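-- pv_equiv track=rewrite | github.com/clouddistrictclub/cloud-district-app | backend/server.py | resolve_tier
-- ===== SOURCE A (Python) =====
-- LOYALTY_TIERS = [
--     {"id": "tier_1", "name": "Bronze Cloud", "pointsRequired": 1000, "reward": 5.00, "icon": "cloud-outline"},
--     {"id": "tier_2", "name": "Silver Storm", "pointsRequired": 5000, "reward": 30.00, "icon": "cloud"},
--     {"id": "tier_3", "name": "Gold Thunder", "pointsRequired": 10000, "reward": 75.00, "icon": "thunderstorm-outline"},
--     {"id": "tier_4", "name": "Platinum Haze", "pointsRequired": 20000, "reward": 175.00, "icon": "thunderstorm"},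
--     {"id": "tier_5", "name": "Diamond Sky", "pointsRequired": 30000, "reward": 300.00, "icon": "diamond"},
-- ]
--
-- TIER_COLORS = {
--     "tier_1": "#CD7F32",
--     "tier_2": "#C0C0C0",
--     "tier_3": "#FFD700",
--     "tier_4": "#A8B8D0",
--     "tier_5": "#B9F2FF",
-- }
--
-- def resolve_tier(points: int):
--     tier_name = None
--     tier_id = None
--     for t in LOYALTY_TIERS:
--         if points >= t["pointsRequired"]:
--             tier_name = t["name"]
--             tier_id = t["id"]
--     return tier_name, TIER_COLORS.get(tier_id, "#666") if tier_id else ("#666")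
-- ===== SOURCE B (Python) =====
-- TIER_COLORS = {
--     "tier_1": "#CD7F32",
--     "tier_2": "#C0C0C0",
--     "tier_3": "#FFD700",
--     "tier_4": "#A8B8D0",
--     "tier_5": "#B9F2FF",
-- }
--
-- _THRESHOLDS = [1000, 5000, 10000, 20000, 30000]
-- _TIERS = [
--     ("tier_1", "Bronze Cloud"),
--     ("tier_2", "Silver Storm"),
--     ("tier_3", "Gold Thunder"),
--     ("tier_4", "Platinum Haze"),
--     ("tier_5", "Diamond Sky"),
-- ]
--
-- def _bisect_right(a, x, lo, hi):
--     while lo < hi: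
--         mid = (lo + hi) // 2
--         if x < a[mid]:
--             hi = mid
--         else:
--             lo = mid + 1
--     return lo
--
-- def resolve_tier(points: int):
--     i = _bisect_right(_THRESHOLDS, points, 0, len(_THRESHOLDS))
--     if i == 0:
--         return None, "#666"
--     tier_id, tier_name = _TIERS[i - 1]
--     return tier_name, TIER_COLORS.get(tier_id, "#666")
-- ===== Notes on version B (the rewrite author's own statement) =====
-- stated objective: idiomatic
-- what changed: Replaces the accumulate-last linear scan over all tiers by a bisect_right binary search on the sorted threshold list, indexing directly into the matching tier.
import Mathlib
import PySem

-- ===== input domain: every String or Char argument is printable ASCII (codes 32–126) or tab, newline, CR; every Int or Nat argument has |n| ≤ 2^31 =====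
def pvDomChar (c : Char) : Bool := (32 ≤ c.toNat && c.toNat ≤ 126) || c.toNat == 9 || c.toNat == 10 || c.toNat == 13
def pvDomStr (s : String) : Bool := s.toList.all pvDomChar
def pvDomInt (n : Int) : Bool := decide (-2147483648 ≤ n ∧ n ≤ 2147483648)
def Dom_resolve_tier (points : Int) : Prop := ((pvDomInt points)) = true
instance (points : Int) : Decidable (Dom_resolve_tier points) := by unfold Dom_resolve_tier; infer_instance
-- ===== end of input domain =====

-- B replaces A's linear accumulate-last scan by a binary search (bisect_right) over the sorted thresholds; objective: idiomatic/alternative.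

-- ===== PORT A =====
-- LOYALTY_TIERS, restricted to the fields the function reads: (id, name, pointsRequired)
def pvLoyaltyTiers : List (String × String × Int) :=
  [("tier_1", "Bronze Cloud", 1000),
   ("tier_2", "Silver Storm", 5000),
   ("tier_3", "Gold Thunder", 10000),
   ("tier_4", "Platinum Haze", 20000),
   ("tier_5", "Diamond Sky", 30000)]

def pvTierColors : PySem.Dict String String := PySem.Dict.ofList
  [("tier_1", "#CD7F32"), ("tier_2", "#C0C0C0"), ("tier_3", "#FFD700"),
   ("tier_4", "#A8B8D0"), ("tier_5", "#B9F2FF")]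

def resolve_tier (points : Int) : Option String × String :=
  let st := pvLoyaltyTiers.foldl
    (fun (acc : Option String × Option String) t =>
      if points ≥ t.2.2 then (some t.2.1, some t.1) else acc)
    (none, none)
  -- `if tier_id else "#666"`: tier_id is None exactly when st.2 = none (ids are non-empty strings)
  (st.1, match st.2 with
         | some tid => pvTierColors.getD tid "#666"
         | none => "#666")

-- ===== PORT B =====
def pvAltThresholds : List Int := [1000, 5000, 10000, 20000, 30000]

def pvAltTiers : List (String × String) :=
  [("tier_1", "Bronze Cloud"), ("tier_2", "Silver Storm"), ("tier_3", "Gold Thunder"),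
   ("tier_4", "Platinum Haze"), ("tier_5", "Diamond Sky")]

-- hand-written bisect_right loop of Source B; a[mid] is always in range, so getD 0 is never the default
-- termination lemmas for the loop (cited by name in decreasing_by)
lemma pvBisect_mid_lt (lo hi : Int) (h : lo < hi) : PySem.Int.floordiv (lo + hi) 2 < hi := by
  rw [PySem.Int.floordiv, Int.fdiv_eq_ediv_of_nonneg _ (by decide)]
  exact (Int.ediv_lt_iff_lt_mul (by decide)).mpr (by omega)

lemma pvBisect_le_mid (lo hi : Int) (h : lo < hi) : lo ≤ PySem.Int.floordiv (lo + hi) 2 := by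
  rw [PySem.Int.floordiv, Int.fdiv_eq_ediv_of_nonneg _ (by decide)]
  exact (Int.le_ediv_iff_mul_le (by decide)).mpr (by omega)

lemma pvBisect_dec_left (lo hi : Int) (h : lo < hi) :
    (PySem.Int.floordiv (lo + hi) 2 - lo).toNat < (hi - lo).toNat :=
  (Int.toNat_lt_toNat (sub_pos.mpr h)).mpr (sub_lt_sub_right (pvBisect_mid_lt lo hi h) lo)

lemma pvBisect_dec_right (lo hi : Int) (h : lo < hi) :
    (hi - (PySem.Int.floordiv (lo + hi) 2 + 1)).toNat < (hi - lo).toNat :=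
  (Int.toNat_lt_toNat (sub_pos.mpr h)).mpr
    (sub_lt_sub_left (Int.lt_add_one_iff.mpr (pvBisect_le_mid lo hi h)) hi)

def pvBisectRight (a : List Int) (x : Int) (lo hi : Int) : Int :=
  if h : lo < hi then
    let mid := PySem.Int.floordiv (lo + hi) 2
    if x < (PySem.List.pyGet? a mid).getD 0 then pvBisectRight a x lo mid
    else pvBisectRight a x (mid + 1) hi
  else lo
termination_by (hi - lo).toNat
decreasing_by
  · exact pvBisect_dec_left lo hi h
  · exact pvBisect_dec_right lo hi h

def resolve_tier_alt (points : Int) : Option String × String :=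
  let i := pvBisectRight pvAltThresholds points 0 (pvAltThresholds.length)
  if i == 0 then (none, "#666")
  else
    match PySem.List.pyGet? pvAltTiers (i - 1) with
    | some (tid, name) => (some name, pvTierColors.getD tid "#666")
    | none => (none, "#666")   -- unreachable: 1 ≤ i ≤ 5

-- ===== PRECONDITION & SPEC =====
def Spec_resolve_tier (points : Int) (out : Option String × String) : Prop := out = resolve_tier_alt points
instance (points : Int) (out : Option String × String) : Decidable (Spec_resolve_tier points out) := by unfold Spec_resolve_tier; infer_instance

-- ===== CLAIM (what is proved, stated in full; the proofs are below) =====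
def Claim_equal_resolve_tier : Prop := ∀ (points : Int), Dom_resolve_tier points → Spec_resolve_tier points (resolve_tier points)

-- ===== LEMMAS AND PROOFS =====

lemma bstep (a : List Int) (x lo hi : Int) (h : lo < hi) :
  pvBisectRight a x lo hi =
    (if x < (PySem.List.pyGet? a (PySem.Int.floordiv (lo + hi) 2)).getD 0
     then pvBisectRight a x lo (PySem.Int.floordiv (lo + hi) 2)
     else pvBisectRight a x (PySem.Int.floordiv (lo + hi) 2 + 1) hi) := by
  rw [pvBisectRight]; simp [h]

lemma bend (a : List Int) (x lo hi : Int) (h : ¬ lo < hi) : pvBisectRight a x lo hi = lo := by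
  rw [pvBisectRight]; simp [h]

lemma bval (p : Int) : pvBisectRight pvAltThresholds p 0 5 =
    if p < 10000 then (if p < 5000 then (if p < 1000 then 0 else 1) else 2)
    else (if p < 30000 then (if p < 20000 then 3 else 4) else 5) := by
  have f52 : Int.fdiv 5 2 = 2 := by decide
  have f22 : Int.fdiv 2 2 = 1 := by decide
  have f12 : Int.fdiv 1 2 = 0 := by decide
  have f82 : Int.fdiv 8 2 = 4 := by decide
  have f72 : Int.fdiv 7 2 = 3 := by decide
  have t0 : Int.toNat 0 = 0 := by decide
  have t1 : Int.toNat 1 = 1 := by decide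
  have t2 : Int.toNat 2 = 2 := by decide
  have t3 : Int.toNat 3 = 3 := by decide
  have t4 : Int.toNat 4 = 4 := by decide
  rw [bstep _ _ _ _ (by decide)]
  norm_num [pvAltThresholds, PySem.List.pyGet?, PySem.List.pyIdx?, PySem.Int.floordiv, f52, f22, f12, f82, f72, t0, t1, t2, t3, t4]
  by_cases h10 : p < 10000
  · rw [if_pos h10, if_pos h10,
        bstep _ _ _ _ (by decide)]
    norm_num [pvAltThresholds, PySem.List.pyGet?, PySem.List.pyIdx?, PySem.Int.floordiv, f52, f22, f12, f82, f72, t0, t1, t2, t3, t4]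
    by_cases h5 : p < 5000
    · rw [if_pos h5, if_pos h5, bstep _ _ _ _ (by decide)]
      norm_num [pvAltThresholds, PySem.List.pyGet?, PySem.List.pyIdx?, PySem.Int.floordiv, f52, f22, f12, f82, f72, t0, t1, t2, t3, t4]
      by_cases h1 : p < 1000
      · rw [if_pos h1, if_pos h1, bend _ _ _ _ (by decide)]
      · rw [if_neg h1, if_neg h1, bend _ _ _ _ (by decide)]
    · rw [if_neg h5, if_neg h5, bend _ _ _ _ (by decide)]
  · rw [if_neg h10, if_neg h10, bstep _ _ _ _ (by decide)]
    norm_num [pvAltThresholds, PySem.List.pyGet?, PySem.List.pyIdx?, PySem.Int.floordiv, f52, f22, f12, f82, f72, t0, t1, t2, t3, t4]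
    by_cases h30 : p < 30000
    · rw [if_pos h30, if_pos h30, bstep _ _ _ _ (by decide)]
      norm_num [pvAltThresholds, PySem.List.pyGet?, PySem.List.pyIdx?, PySem.Int.floordiv, f52, f22, f12, f82, f72, t0, t1, t2, t3, t4]
      by_cases h20 : p < 20000
      · rw [if_pos h20, if_pos h20, bend _ _ _ _ (by decide)]
      · rw [if_neg h20, if_neg h20, bend _ _ _ _ (by decide)]
    · rw [if_neg h30, if_neg h30, bend _ _ _ _ (by decide)]


-- ===== VERDICT (by name: the statement is the Claim_ definition above) =====
theorem resolve_tier_spec : Claim_equal_resolve_tier := by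
  intro p _
  unfold Spec_resolve_tier
  have hlen : ((pvAltThresholds.length : Nat) : Int) = 5 := by norm_num [pvAltThresholds]
  simp only [resolve_tier, resolve_tier_alt, pvLoyaltyTiers, List.foldl, hlen, bval, beq_iff_eq]
  split_ifs <;> first | rfl | omega
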